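-- pv_equiv track=rewrite | github.com/perryl/morph | import/pip_lorry.py | get_compression
-- ===== SOURCE A (Python) =====
-- def get_compression(url):
--     bzip = 'bzip2'
--     gzip = 'gzip'
--     lzma = 'lzma'
--
--     m = {'tar.gz': gzip, 'tgz': gzip, 'tar.Z': gzip,
--            'tar.bz2': bzip, 'tbz2': bzip,
--            'tar.lzma': lzma, 'tar.xz': lzma, 'tlz': lzma, 'txz': lzma}
--
--     for x in [1, 2]:
--         ext = '.'.join(url.split('.')[-x:])
--         if ext in m: return m[ext]
--
--     return None
-- ===== SOURCE B (Python) =====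
-- def get_compression(url):
--     def has(ext):
--         return url == ext or url.endswith('.' + ext)
--
--     if has('tar.gz') or has('tgz') or has('tar.Z'):
--         return 'gzip'
--     if has('tar.bz2') or has('tbz2'):
--         return 'bzip2'
--     if has('tar.lzma') or has('tar.xz') or has('tlz') or has('txz'):
--         return 'lzma'
--     return None
-- ===== Notes on version B (the rewrite author's own statement) =====
-- stated objective: simpler
-- what changed: A extracts the last one and two dot-separated components via split/join and looks each up in a dict; B has no dict or splitting at all: a plain if/elif chain grouped by compression type tests whether the URL equals an extension or ends with a dot followed by it.
import Mathlib
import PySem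

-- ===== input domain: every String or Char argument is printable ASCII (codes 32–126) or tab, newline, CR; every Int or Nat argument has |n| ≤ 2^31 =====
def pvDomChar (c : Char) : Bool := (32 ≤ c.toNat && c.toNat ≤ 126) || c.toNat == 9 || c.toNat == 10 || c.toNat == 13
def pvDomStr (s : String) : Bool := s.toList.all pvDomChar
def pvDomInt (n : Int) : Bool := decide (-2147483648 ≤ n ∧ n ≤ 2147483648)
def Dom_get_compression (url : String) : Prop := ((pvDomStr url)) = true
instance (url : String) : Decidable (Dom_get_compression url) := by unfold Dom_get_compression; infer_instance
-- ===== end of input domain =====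

-- B replaces A's split/join suffix extraction plus dict lookup by a table-free
-- if/elif chain grouped by compression type, testing whether the URL equals an
-- extension or ends with a dot followed by it (simpler; same return values).

-- ===== PORT A =====
-- the dict literal m (insertion order kept)
def pvMap : PySem.Dict String String :=
  PySem.Dict.ofList [("tar.gz", "gzip"), ("tgz", "gzip"), ("tar.Z", "gzip"),
    ("tar.bz2", "bzip2"), ("tbz2", "bzip2"),
    ("tar.lzma", "lzma"), ("tar.xz", "lzma"), ("tlz", "lzma"), ("txz", "lzma")]

def get_compression (url : String) : Option String :=
  let m := pvMap
  -- for x in [1, 2] with early return, carried as an Option accumulator;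
  -- url.split('.') has a nonempty literal separator so it cannot raise:
  -- PySem.Chars.splitOn on the code points is exact (PySem.Str.split?_map).
  [(1 : Int), 2].foldl
    (fun acc x =>
      match acc with
      | some r => some r
      | none =>
        let ext := PySem.Str.join "."
          (PySem.List.slice ((PySem.Chars.splitOn url.toList ['.']).map String.ofList)
            (some (-x)) none)
        if m.contains ext then m.get? ext else none)
    none

-- ===== PORT B =====
-- B: no dict, no splitting — an if/elif chain grouped by compression type,
-- with a local predicate has(ext) = (url == ext or url.endswith('.' + ext)).
def get_compression_alt (url : String) : Option String :=
  let has := fun (ext : String) => url == ext || PySem.Str.endswith url ("." ++ ext)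
  if has "tar.gz" || has "tgz" || has "tar.Z" then some "gzip"
  else if has "tar.bz2" || has "tbz2" then some "bzip2"
  else if has "tar.lzma" || has "tar.xz" || has "tlz" || has "txz" then some "lzma"
  else none

-- ===== PRECONDITION & SPEC =====
def Spec_get_compression (url : String) (out : Option String) : Prop := out = get_compression_alt url
instance (url : String) (out : Option String) : Decidable (Spec_get_compression url out) := by unfold Spec_get_compression; infer_instance

-- ===== CLAIM (what is proved, stated in full; the proofs are below) =====
def Claim_equal_get_compression : Prop := ∀ (url : String), Dom_get_compression url → Spec_get_compression url (get_compression url)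

-- ===== LEMMAS AND PROOFS =====

-- a front-recursion spec for splitting on '.'
def pvSplit : List Char → List (List Char)
  | [] => [[]]
  | c :: cs => if c = '.' then [] :: pvSplit cs else (pvSplit cs).modifyHead (c :: ·)

theorem pvSplit_ne_nil (cs : List Char) : pvSplit cs ≠ [] := by
  cases cs with
  | nil => simp [pvSplit]
  | cons c cs =>
    simp only [pvSplit]
    split
    · simp
    · cases h : pvSplit cs with
      | nil => exact absurd h (pvSplit_ne_nil cs)
      | cons a t => simp

theorem splitOn_go_spec (fuel : Nat) : ∀ (l cur : List Char) (acc : List (List Char)),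
    l.length < fuel →
    PySem.Chars.splitOn.go ['.'] fuel l cur acc
      = acc.reverse ++ (pvSplit l).modifyHead (cur.reverse ++ ·) := by
  induction fuel with
  | zero => intro l cur acc h; omega
  | succ f ih =>
    intro l cur acc h
    cases l with
    | nil => simp [PySem.Chars.splitOn.go, pvSplit]
    | cons c rest =>
      rw [PySem.Chars.splitOn.go]
      by_cases hc : c = '.'
      · subst hc
        have hpre : List.isPrefixOf ['.'] ('.' :: rest) = true := by simp [List.isPrefixOf]
        rw [if_pos hpre]
        simp only [List.length_cons, List.length_nil, List.drop_succ_cons, List.drop_zero]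
        rw [ih rest [] (cur.reverse :: acc) (by simp at h; omega)]
        cases hx : pvSplit rest with
        | nil => exact absurd hx (pvSplit_ne_nil rest)
        | cons a t => simp [pvSplit, hx]
      · have hpre : List.isPrefixOf ['.'] (c :: rest) = false := by
          simp [List.isPrefixOf, Ne.symm hc]
        rw [if_neg (by simp [hpre])]
        rw [ih rest (c :: cur) acc (by simp at h; omega)]
        simp only [pvSplit, if_neg hc]
        cases hx : pvSplit rest with
        | nil => exact absurd hx (pvSplit_ne_nil rest)
        | cons a t => simp

theorem splitOn_dot (cs : List Char) : PySem.Chars.splitOn cs ['.'] = pvSplit cs := by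
  rw [PySem.Chars.splitOn, splitOn_go_spec (cs.length + 1) cs [] [] (by omega)]
  cases h : pvSplit cs with
  | nil => exact absurd h (pvSplit_ne_nil cs)
  | cons a t => simp

theorem pvSplit_no_dot (cs : List Char) (h : '.' ∉ cs) : pvSplit cs = [cs] := by
  induction cs with
  | nil => rfl
  | cons c cs ih =>
    simp only [List.mem_cons, not_or] at h
    simp [pvSplit, Ne.symm h.1, ih h.2]

theorem pvSplit_append_dot (xs ys : List Char) (h : '.' ∉ ys) :
    pvSplit (xs ++ '.' :: ys) = pvSplit xs ++ [ys] := by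
  induction xs with
  | nil => simp [pvSplit, pvSplit_no_dot ys h]
  | cons c xs ih =>
    by_cases hc : c = '.'
    · simp [pvSplit, hc, ih]
    · simp only [List.cons_append, pvSplit, if_neg hc, ih]
      cases hx : pvSplit xs with
      | nil => exact absurd hx (pvSplit_ne_nil xs)
      | cons a t => simp

theorem decomp_dot (cs : List Char) (h : '.' ∈ cs) :
    ∃ xs p, cs = xs ++ '.' :: p ∧ '.' ∉ p := by
  induction cs with
  | nil => simp at h
  | cons c cs ih =>
    by_cases hd : '.' ∈ cs
    · obtain ⟨xs, p, rfl, hp⟩ := ih hd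
      exact ⟨c :: xs, p, rfl, hp⟩
    · have hc : c = '.' := by
        rcases List.mem_cons.mp h with h1 | h1
        · exact h1.symm
        · exact absurd h1 hd
      exact ⟨[], cs, by simp [hc], hd⟩

-- a dot-free chunk preceded by '.' at the end of a list is unique
theorem dot_suffix_unique {p q : List Char} (xs : List Char)
    (hp : '.' ∉ p) (hq : '.' ∉ q) (h : ('.' :: p) <:+ xs ++ '.' :: q) : p = q := by
  have h2 : ('.' :: q) <:+ xs ++ '.' :: q := List.suffix_append xs ('.' :: q)
  rcases List.suffix_or_suffix_of_suffix h h2 with h3 | h3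
  · rcases List.suffix_cons_iff.mp h3 with h4 | h4
    · exact (List.cons.injEq _ _ _ _ ▸ h4).2
    · exact absurd (h4.mem (by simp)) hq
  · rcases List.suffix_cons_iff.mp h3 with h4 | h4
    · exact ((List.cons.injEq _ _ _ _ ▸ h4).2).symm
    · exact absurd (h4.mem (by simp)) hp

theorem suffix_cancel {u v t : List Char} (h : u ++ t <:+ v ++ t) : u <:+ v := by
  obtain ⟨w, hw⟩ := h
  exact ⟨w, List.append_cancel_right (by simpa [List.append_assoc] using hw)⟩

theorem dot_eq_iff {p2 p a b : List Char} (hp : '.' ∉ p) (hb : '.' ∉ b) :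
    p2 ++ '.' :: p = a ++ '.' :: b ↔ p2 = a ∧ p = b := by
  constructor
  · intro h
    have hpb : p = b := by
      apply dot_suffix_unique a hp hb
      rw [← h]; exact List.suffix_append p2 ('.' :: p)
    subst hpb
    exact ⟨List.append_cancel_right h, rfl⟩
  · rintro ⟨rfl, rfl⟩; rfl

theorem dot_suffix_iff {k xs q : List Char} (hk : '.' ∉ k) (hq : '.' ∉ q) :
    ('.' :: k) <:+ xs ++ '.' :: q ↔ k = q := by
  constructor
  · exact dot_suffix_unique xs hk hq
  · rintro rfl; exact List.suffix_append _ _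

-- slice and join evaluation
theorem slice_last1 {α : Type} (l : List α) (a : α) :
    PySem.List.slice (l ++ [a]) (some (-1)) none = [a] := by
  unfold PySem.List.slice PySem.List.clampIdx
  have h2 : ¬ (((l ++ [a]).length : Int) + (-1) < 0) := by simp
  have h3 : (((l ++ [a]).length : Int) + (-1)).toNat = l.length := by simp
  simp only [if_pos (by norm_num : (-1 : Int) < 0), if_neg h2, h3]
  have h4 : (l ++ [a]).length - l.length = 1 := by simp
  rw [h4, List.drop_left]
  rfl

theorem slice_last2 {α : Type} (l : List α) (a b : α) :
    PySem.List.slice (l ++ [a, b]) (some (-2)) none = [a, b] := by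
  unfold PySem.List.slice PySem.List.clampIdx
  have h2 : ¬ (((l ++ [a, b]).length : Int) + (-2) < 0) := by simp
  have h3 : (((l ++ [a, b]).length : Int) + (-2)).toNat = l.length := by simp
  simp only [if_pos (by norm_num : (-2 : Int) < 0), if_neg h2, h3]
  have h4 : (l ++ [a, b]).length - l.length = 2 := by simp
  rw [h4, List.drop_left]
  rfl

theorem slice_single2 {α : Type} (a : α) :
    PySem.List.slice [a] (some (-2)) none = [a] := by
  simp [PySem.List.slice, PySem.List.clampIdx]

theorem join_one (p : List Char) :
    PySem.Str.join "." [String.ofList p] = String.ofList p := by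
  apply String.ext_iff.mpr
  simp [PySem.Str.toList_join, PySem.Chars.join, List.intercalate]

theorem join_two (a b : List Char) :
    PySem.Str.join "." [String.ofList a, String.ofList b] = String.ofList (a ++ '.' :: b) := by
  apply String.ext_iff.mpr
  simp [PySem.Str.toList_join, PySem.Chars.join, List.intercalate]

theorem opt_match_self (E : Option String) :
    (match E with | some r => some r | none => E) = E := by
  cases E <;> rfl

theorem lookup_eval (s : String) :
    (if pvMap.contains s then pvMap.get? s else none) =
    (if s = "tar.gz" then some "gzip" else if s = "tgz" then some "gzip"
     else if s = "tar.Z" then some "gzip" else if s = "tar.bz2" then some "bzip2"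
     else if s = "tbz2" then some "bzip2" else if s = "tar.lzma" then some "lzma"
     else if s = "tar.xz" then some "lzma" else if s = "tlz" then some "lzma"
     else if s = "txz" then some "lzma" else none) := by
  have hm : pvMap = PySem.Dict.mk [("tar.gz", "gzip"), ("tgz", "gzip"), ("tar.Z", "gzip"),
      ("tar.bz2", "bzip2"), ("tbz2", "bzip2"),
      ("tar.lzma", "lzma"), ("tar.xz", "lzma"), ("tlz", "lzma"), ("txz", "lzma")] := by rfl
  rw [hm]
  by_cases h1 : s = "tar.gz"
  · subst h1; rfl
  by_cases h2 : s = "tgz"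
  · subst h2; rfl
  by_cases h3 : s = "tar.Z"
  · subst h3; rfl
  by_cases h4 : s = "tar.bz2"
  · subst h4; rfl
  by_cases h5 : s = "tbz2"
  · subst h5; rfl
  by_cases h6 : s = "tar.lzma"
  · subst h6; rfl
  by_cases h7 : s = "tar.xz"
  · subst h7; rfl
  by_cases h8 : s = "tlz"
  · subst h8; rfl
  by_cases h9 : s = "txz"
  · subst h9; rfl
  simp [PySem.Dict.contains, beq_iff_eq, h1, h2, h3, h4, h5, h6, h7, h8, h9,
    Ne.symm h1, Ne.symm h2, Ne.symm h3, Ne.symm h4, Ne.symm h5, Ne.symm h6,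
    Ne.symm h7, Ne.symm h8, Ne.symm h9]

theorem bcond (url k : String) :
    (url == k || PySem.Str.endswith url ("." ++ k)) =
    decide (url.toList = k.toList ∨ ('.' :: k.toList) <:+ url.toList) := by
  have h1 : (url == k) = decide (url.toList = k.toList) := by
    by_cases h : url = k
    · simp [h]
    · have h' : ¬ url.toList = k.toList := fun hc => h (String.ext_iff.mpr hc)
      simp [h, h']
  have h2 : PySem.Str.endswith url ("." ++ k) = decide (('.' :: k.toList) <:+ url.toList) := by
    rw [PySem.Str.endswith_eq]
    have : ("." ++ k).toList = '.' :: k.toList := by simp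
    rw [this]
    by_cases h : ('.' :: k.toList) <:+ url.toList
    · simp [h, (PySem.Chars.endswith_iff _ _).mpr h]
    · simp only [h, decide_false]
      rw [← Bool.not_eq_true]
      intro hc
      exact absurd ((PySem.Chars.endswith_iff _ _).mp hc) h
  rw [h1, h2]
  by_cases ha : url.toList = k.toList <;> by_cases hb : ('.' :: k.toList) <:+ url.toList <;>
    simp [ha, hb]

theorem if_or {A : Type} (p q : Prop) [Decidable p] [Decidable q] (x r : A) :
    (if p ∨ q then x else r) = if p then x else if q then x else r := by
  by_cases hp : p <;> by_cases hq : q <;> simp [hp, hq]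

theorem alt_eval (url : String) :
    get_compression_alt url =
    (if url.toList = "tar.gz".toList ∨ ('.' :: "tar.gz".toList) <:+ url.toList then some "gzip"
     else if url.toList = "tgz".toList ∨ ('.' :: "tgz".toList) <:+ url.toList then some "gzip"
     else if url.toList = "tar.Z".toList ∨ ('.' :: "tar.Z".toList) <:+ url.toList then some "gzip"
     else if url.toList = "tar.bz2".toList ∨ ('.' :: "tar.bz2".toList) <:+ url.toList then some "bzip2"
     else if url.toList = "tbz2".toList ∨ ('.' :: "tbz2".toList) <:+ url.toList then some "bzip2"
     else if url.toList = "tar.lzma".toList ∨ ('.' :: "tar.lzma".toList) <:+ url.toList then some "lzma"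
     else if url.toList = "tar.xz".toList ∨ ('.' :: "tar.xz".toList) <:+ url.toList then some "lzma"
     else if url.toList = "tlz".toList ∨ ('.' :: "tlz".toList) <:+ url.toList then some "lzma"
     else if url.toList = "txz".toList ∨ ('.' :: "txz".toList) <:+ url.toList then some "lzma"
     else none) := by
  simp only [get_compression_alt, bcond, Bool.or_eq_true, decide_eq_true_eq, or_assoc, if_or]

theorem A_eval (url e1 e2 : String)
    (h1 : PySem.Str.join "."
        (PySem.List.slice ((PySem.Chars.splitOn url.toList ['.']).map String.ofList)
          (some (-(1 : Int))) none) = e1)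
    (h2 : PySem.Str.join "."
        (PySem.List.slice ((PySem.Chars.splitOn url.toList ['.']).map String.ofList)
          (some (-(2 : Int))) none) = e2) :
    get_compression url =
      (match (if pvMap.contains e1 then pvMap.get? e1 else none) with
       | some r => some r
       | none => if pvMap.contains e2 then pvMap.get? e2 else none) := by
  simp only [get_compression, List.foldl_cons, List.foldl_nil]
  rw [← h1, ← h2]

theorem eq_dotted_dotfree_false (xs p1 k : List Char) (hk : '.' ∉ k) :
    (xs ++ '.' :: p1 = k) ↔ False := by
  simp only [iff_false]
  intro h
  exact hk (h ▸ (by simp : '.' ∈ xs ++ '.' :: p1))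

theorem eq_dotfree_dotted_false (p k : List Char) (hp : '.' ∉ p) (hk : '.' ∈ k) :
    (p = k) ↔ False := by
  simp only [iff_false]
  rintro rfl
  exact hp hk

theorem suffix_dotted_one_false (xs p1 a b : List Char) (hxs : '.' ∉ xs) (hp1 : '.' ∉ p1)
    (hb : '.' ∉ b) :
    ('.' :: (a ++ '.' :: b) <:+ xs ++ '.' :: p1) ↔ False := by
  simp only [iff_false]
  intro h
  have hsub : ('.' :: b) <:+ xs ++ '.' :: p1 := by
    refine List.IsSuffix.trans ?_ h
    have he : '.' :: (a ++ '.' :: b) = ('.' :: a) ++ '.' :: b := by simp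
    rw [he]
    exact List.suffix_append _ _
  have hbp : b = p1 := dot_suffix_unique xs hb hp1 hsub
  subst hbp
  have h' : ('.' :: a) ++ ('.' :: b) <:+ xs ++ ('.' :: b) := by simpa using h
  exact hxs ((suffix_cancel h').mem (by simp))

theorem suffix_dotted_two_iff (ys p2 p1 a b : List Char) (hp2 : '.' ∉ p2) (hp1 : '.' ∉ p1)
    (ha : '.' ∉ a) (hb : '.' ∉ b) :
    ('.' :: (a ++ '.' :: b) <:+ (ys ++ '.' :: p2) ++ '.' :: p1) ↔ (p2 = a ∧ p1 = b) := by
  constructor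
  · intro h
    have hsub : ('.' :: b) <:+ (ys ++ '.' :: p2) ++ '.' :: p1 := by
      refine List.IsSuffix.trans ?_ h
      have he : '.' :: (a ++ '.' :: b) = ('.' :: a) ++ '.' :: b := by simp
      rw [he]
      exact List.suffix_append _ _
    have hbp : b = p1 := dot_suffix_unique (ys ++ '.' :: p2) hb hp1 hsub
    subst hbp
    have h' : ('.' :: a) ++ ('.' :: b) <:+ (ys ++ '.' :: p2) ++ ('.' :: b) := by simpa using h
    have hap : a = p2 := dot_suffix_unique ys ha hp2 (suffix_cancel h')
    exact ⟨hap.symm, rfl⟩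
  · rintro ⟨h2, h1⟩
    rw [← h2, ← h1]
    have he : ('.' :: (p2 ++ '.' :: p1) : List Char) = ('.' :: p2) ++ '.' :: p1 := by simp
    rw [he]
    have h3 : (ys ++ '.' :: p2) ++ '.' :: p1 = ys ++ (('.' :: p2) ++ '.' :: p1) := by simp
    rw [h3]
    exact List.suffix_append _ _

theorem main_nodot (url : String) (h : '.' ∉ url.toList) :
    get_compression url = get_compression_alt url := by
  have hsplit : (PySem.Chars.splitOn url.toList ['.']).map String.ofList
      = [String.ofList url.toList] := by
    rw [splitOn_dot, pvSplit_no_dot _ h]; rfl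
  rw [A_eval url (String.ofList url.toList) (String.ofList url.toList)
      (by rw [hsplit]; rw [show [String.ofList url.toList] = [] ++ [String.ofList url.toList] from rfl,
            slice_last1]; exact join_one _)
      (by rw [hsplit, slice_single2]; exact join_one _),
    lookup_eval, opt_match_self, alt_eval]
  have hsuf : ∀ k : List Char, ('.' :: k <:+ url.toList) = False := by
    intro k
    simp only [eq_iff_iff, iff_false]
    exact fun hk => h (hk.mem (by simp))
  simp [String.ext_iff, hsuf]

theorem main_one (url : String) (xs p1 : List Char) (hcs : url.toList = xs ++ '.' :: p1)
    (hxs : '.' ∉ xs) (hp1 : '.' ∉ p1) :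
    get_compression url = get_compression_alt url := by
  have hsplit : (PySem.Chars.splitOn url.toList ['.']).map String.ofList
      = [String.ofList xs, String.ofList p1] := by
    rw [splitOn_dot, hcs, pvSplit_append_dot xs p1 hp1, pvSplit_no_dot xs hxs]
    rfl
  rw [A_eval url (String.ofList p1) (String.ofList (xs ++ '.' :: p1))
      (by rw [hsplit,
            show [String.ofList xs, String.ofList p1]
              = [String.ofList xs] ++ [String.ofList p1] from rfl, slice_last1]
          exact join_one _)
      (by rw [hsplit,
            show [String.ofList xs, String.ofList p1]
              = [] ++ [String.ofList xs, String.ofList p1] from rfl, slice_last2]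
          exact join_two _ _),
    lookup_eval, lookup_eval, alt_eval, hcs]
  simp only [String.ext_iff, String.toList_ofList]
  have d1 : "tar.gz".toList = "tar".toList ++ '.' :: "gz".toList := by simp
  have d2 : "tar.Z".toList = "tar".toList ++ '.' :: "Z".toList := by simp
  have d3 : "tar.bz2".toList = "tar".toList ++ '.' :: "bz2".toList := by simp
  have d4 : "tar.lzma".toList = "tar".toList ++ '.' :: "lzma".toList := by simp
  have d5 : "tar.xz".toList = "tar".toList ++ '.' :: "xz".toList := by simp
  rw [d1, d2, d3, d4, d5]
  simp only [dot_eq_iff hp1 (by simp : ('.' : Char) ∉ "gz".toList),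
    dot_eq_iff hp1 (by simp : ('.' : Char) ∉ "Z".toList),
    dot_eq_iff hp1 (by simp : ('.' : Char) ∉ "bz2".toList),
    dot_eq_iff hp1 (by simp : ('.' : Char) ∉ "lzma".toList),
    dot_eq_iff hp1 (by simp : ('.' : Char) ∉ "xz".toList),
    suffix_dotted_one_false xs p1 _ _ hxs hp1 (by simp : ('.' : Char) ∉ "gz".toList),
    suffix_dotted_one_false xs p1 _ _ hxs hp1 (by simp : ('.' : Char) ∉ "Z".toList),
    suffix_dotted_one_false xs p1 _ _ hxs hp1 (by simp : ('.' : Char) ∉ "bz2".toList),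
    suffix_dotted_one_false xs p1 _ _ hxs hp1 (by simp : ('.' : Char) ∉ "lzma".toList),
    suffix_dotted_one_false xs p1 _ _ hxs hp1 (by simp : ('.' : Char) ∉ "xz".toList),
    eq_dotted_dotfree_false xs p1 _ (by simp : ('.' : Char) ∉ "tgz".toList),
    eq_dotted_dotfree_false xs p1 _ (by simp : ('.' : Char) ∉ "tbz2".toList),
    eq_dotted_dotfree_false xs p1 _ (by simp : ('.' : Char) ∉ "tlz".toList),
    eq_dotted_dotfree_false xs p1 _ (by simp : ('.' : Char) ∉ "txz".toList),
    eq_dotfree_dotted_false p1 ("tar".toList ++ '.' :: "gz".toList) hp1 (by simp),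
    eq_dotfree_dotted_false p1 ("tar".toList ++ '.' :: "Z".toList) hp1 (by simp),
    eq_dotfree_dotted_false p1 ("tar".toList ++ '.' :: "bz2".toList) hp1 (by simp),
    eq_dotfree_dotted_false p1 ("tar".toList ++ '.' :: "lzma".toList) hp1 (by simp),
    eq_dotfree_dotted_false p1 ("tar".toList ++ '.' :: "xz".toList) hp1 (by simp),
    dot_suffix_iff (by simp : ('.' : Char) ∉ "tgz".toList) hp1,
    dot_suffix_iff (by simp : ('.' : Char) ∉ "tbz2".toList) hp1,
    dot_suffix_iff (by simp : ('.' : Char) ∉ "tlz".toList) hp1,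
    dot_suffix_iff (by simp : ('.' : Char) ∉ "txz".toList) hp1]
  by_cases h1 : p1 = "tgz".toList
  · simp [h1]
  by_cases h2 : p1 = "tbz2".toList
  · simp [h2]
  by_cases h3 : p1 = "tlz".toList
  · simp [h3]
  by_cases h4 : p1 = "txz".toList
  · simp [h4]
  by_cases h5 : p1 = "gz".toList
  · simp [h5]
  by_cases h6 : p1 = "Z".toList
  · simp [h6]
  by_cases h7 : p1 = "bz2".toList
  · simp [h7]
  by_cases h8 : p1 = "lzma".toList
  · simp [h8]
  by_cases h9 : p1 = "xz".toList
  · simp [h9]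
  have g1 : ¬(['t', 'g', 'z'] = p1) := fun h => h1 (by simpa using h.symm)
  have g2 : ¬(['t', 'b', 'z', '2'] = p1) := fun h => h2 (by simpa using h.symm)
  have g3 : ¬(['t', 'l', 'z'] = p1) := fun h => h3 (by simpa using h.symm)
  have g4 : ¬(['t', 'x', 'z'] = p1) := fun h => h4 (by simpa using h.symm)
  simp_all

theorem main_two (url : String) (ys p2 p1 : List Char)
    (hcs : url.toList = (ys ++ '.' :: p2) ++ '.' :: p1)
    (hp2 : '.' ∉ p2) (hp1 : '.' ∉ p1) :
    get_compression url = get_compression_alt url := by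
  have hsplit : (PySem.Chars.splitOn url.toList ['.']).map String.ofList
      = (pvSplit ys).map String.ofList ++ [String.ofList p2, String.ofList p1] := by
    rw [splitOn_dot, hcs, pvSplit_append_dot _ p1 hp1, pvSplit_append_dot ys p2 hp2]
    simp
  rw [A_eval url (String.ofList p1) (String.ofList (p2 ++ '.' :: p1))
      (by rw [hsplit,
            show (pvSplit ys).map String.ofList ++ [String.ofList p2, String.ofList p1]
              = ((pvSplit ys).map String.ofList ++ [String.ofList p2]) ++ [String.ofList p1]
              by simp, slice_last1]
          exact join_one _)
      (by rw [hsplit, slice_last2]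
          exact join_two _ _),
    lookup_eval, lookup_eval, alt_eval, hcs]
  simp only [String.ext_iff, String.toList_ofList]
  have d1 : "tar.gz".toList = "tar".toList ++ '.' :: "gz".toList := by simp
  have d2 : "tar.Z".toList = "tar".toList ++ '.' :: "Z".toList := by simp
  have d3 : "tar.bz2".toList = "tar".toList ++ '.' :: "bz2".toList := by simp
  have d4 : "tar.lzma".toList = "tar".toList ++ '.' :: "lzma".toList := by simp
  have d5 : "tar.xz".toList = "tar".toList ++ '.' :: "xz".toList := by simp
  rw [d1, d2, d3, d4, d5]
  simp only [dot_eq_iff hp1 (by simp : ('.' : Char) ∉ "gz".toList),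
    dot_eq_iff hp1 (by simp : ('.' : Char) ∉ "Z".toList),
    dot_eq_iff hp1 (by simp : ('.' : Char) ∉ "bz2".toList),
    dot_eq_iff hp1 (by simp : ('.' : Char) ∉ "lzma".toList),
    dot_eq_iff hp1 (by simp : ('.' : Char) ∉ "xz".toList),
    suffix_dotted_two_iff ys p2 p1 _ _ hp2 hp1 (by simp : ('.' : Char) ∉ "tar".toList) (by simp : ('.' : Char) ∉ "gz".toList),
    suffix_dotted_two_iff ys p2 p1 _ _ hp2 hp1 (by simp : ('.' : Char) ∉ "tar".toList) (by simp : ('.' : Char) ∉ "Z".toList),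
    suffix_dotted_two_iff ys p2 p1 _ _ hp2 hp1 (by simp : ('.' : Char) ∉ "tar".toList) (by simp : ('.' : Char) ∉ "bz2".toList),
    suffix_dotted_two_iff ys p2 p1 _ _ hp2 hp1 (by simp : ('.' : Char) ∉ "tar".toList) (by simp : ('.' : Char) ∉ "lzma".toList),
    suffix_dotted_two_iff ys p2 p1 _ _ hp2 hp1 (by simp : ('.' : Char) ∉ "tar".toList) (by simp : ('.' : Char) ∉ "xz".toList),
    eq_dotted_dotfree_false p2 p1 _ (by simp : ('.' : Char) ∉ "tgz".toList),
    eq_dotted_dotfree_false p2 p1 _ (by simp : ('.' : Char) ∉ "tbz2".toList),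
    eq_dotted_dotfree_false p2 p1 _ (by simp : ('.' : Char) ∉ "tlz".toList),
    eq_dotted_dotfree_false p2 p1 _ (by simp : ('.' : Char) ∉ "txz".toList),
    eq_dotted_dotfree_false (ys ++ '.' :: p2) p1 _ (by simp : ('.' : Char) ∉ "tgz".toList),
    eq_dotted_dotfree_false (ys ++ '.' :: p2) p1 _ (by simp : ('.' : Char) ∉ "tbz2".toList),
    eq_dotted_dotfree_false (ys ++ '.' :: p2) p1 _ (by simp : ('.' : Char) ∉ "tlz".toList),
    eq_dotted_dotfree_false (ys ++ '.' :: p2) p1 _ (by simp : ('.' : Char) ∉ "txz".toList),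
    eq_dotfree_dotted_false p1 ("tar".toList ++ '.' :: "gz".toList) hp1 (by simp),
    eq_dotfree_dotted_false p1 ("tar".toList ++ '.' :: "Z".toList) hp1 (by simp),
    eq_dotfree_dotted_false p1 ("tar".toList ++ '.' :: "bz2".toList) hp1 (by simp),
    eq_dotfree_dotted_false p1 ("tar".toList ++ '.' :: "lzma".toList) hp1 (by simp),
    eq_dotfree_dotted_false p1 ("tar".toList ++ '.' :: "xz".toList) hp1 (by simp),
    dot_suffix_iff (by simp : ('.' : Char) ∉ "tgz".toList) hp1,
    dot_suffix_iff (by simp : ('.' : Char) ∉ "tbz2".toList) hp1,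
    dot_suffix_iff (by simp : ('.' : Char) ∉ "tlz".toList) hp1,
    dot_suffix_iff (by simp : ('.' : Char) ∉ "txz".toList) hp1]
  have hy : ¬(ys ++ '.' :: p2 = ['t', 'a', 'r']) := fun h => by
    have hmem : '.' ∈ (['t', 'a', 'r'] : List Char) := h ▸ (by simp)
    simp at hmem
  by_cases h1 : p1 = "tgz".toList
  · simp [h1]
  by_cases h2 : p1 = "tbz2".toList
  · simp [h2]
  by_cases h3 : p1 = "tlz".toList
  · simp [h3]
  by_cases h4 : p1 = "txz".toList
  · simp [h4]
  by_cases h5 : p1 = "gz".toList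
  · simp [h5, hy]
  by_cases h6 : p1 = "Z".toList
  · simp [h6, hy]
  by_cases h7 : p1 = "bz2".toList
  · simp [h7, hy]
  by_cases h8 : p1 = "lzma".toList
  · simp [h8, hy]
  by_cases h9 : p1 = "xz".toList
  · simp [h9, hy]
  have g1 : ¬(['t', 'g', 'z'] = p1) := fun h => h1 (by simpa using h.symm)
  have g2 : ¬(['t', 'b', 'z', '2'] = p1) := fun h => h2 (by simpa using h.symm)
  have g3 : ¬(['t', 'l', 'z'] = p1) := fun h => h3 (by simpa using h.symm)
  have g4 : ¬(['t', 'x', 'z'] = p1) := fun h => h4 (by simpa using h.symm)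
  simp_all

-- ===== VERDICT (by name: the statement is the Claim_ definition above) =====
theorem get_compression_spec : Claim_equal_get_compression := by
  intro url _
  unfold Spec_get_compression
  by_cases h : '.' ∈ url.toList
  · obtain ⟨xs, p, hcs, hp⟩ := decomp_dot _ h
    by_cases h2 : '.' ∈ xs
    · obtain ⟨ys, p2, hxs2, hp2⟩ := decomp_dot _ h2
      exact main_two url ys p2 p (by rw [hcs, hxs2]) hp2 hp
    · exact main_one url xs p hcs h2 hp
  · exact main_nodot url h
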